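-- pv_equiv track=rewrite | github.com/Behnoushin/Algorithm | SearchLastNegativeBeforeZero.py | searchLastNegativeBeforeZero
-- ===== SOURCE A (Python) =====
-- def searchLastNegativeBeforeZero(nums: list[int]) -> int | None:
--     last_negative = None
--     for x in nums:
--         if x == 0:
--             break
--         if x < 0:
--             last_negative = x
--     return last_negative
-- ===== SOURCE B (Python) =====
-- def searchLastNegativeBeforeZero(nums: list[int]) -> int | None:
--     try:
--         stop = nums.index(0)
--     except ValueError:
--         stop = len(nums)
--     for x in reversed(nums[:stop]):
--         if x < 0:
--             return x
--     return None
-- ===== Notes on version B (the rewrite author's own statement) =====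
-- stated objective: alternative
-- what changed: Replaces the single early-breaking accumulator loop with a two-phase pipeline: locate the first zero with list.index, then scan the prefix before it in reverse and return the first negative found.
import Mathlib
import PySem

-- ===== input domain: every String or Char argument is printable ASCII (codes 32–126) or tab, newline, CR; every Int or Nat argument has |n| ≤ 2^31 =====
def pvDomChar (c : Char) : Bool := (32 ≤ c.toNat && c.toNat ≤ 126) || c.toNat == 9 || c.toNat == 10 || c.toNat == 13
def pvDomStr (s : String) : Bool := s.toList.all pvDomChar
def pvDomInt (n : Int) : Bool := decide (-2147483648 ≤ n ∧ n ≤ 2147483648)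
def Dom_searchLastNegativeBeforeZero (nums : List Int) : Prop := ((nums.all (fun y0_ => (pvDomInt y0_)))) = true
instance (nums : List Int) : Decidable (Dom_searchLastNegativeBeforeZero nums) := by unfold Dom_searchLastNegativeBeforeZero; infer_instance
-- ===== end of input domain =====

-- B replaces A's early-breaking accumulator loop by locating the first zero and scanning the prefix before it in reverse (alternative decomposition, same cost).


-- ===== PORT A =====
-- loop with accumulator `last_negative`, early break on x == 0
def pvGoA : List Int → Option Int → Option Int
  | [], acc => acc
  | x :: xs, acc =>
      if x == 0 then acc
      else pvGoA xs (if x < 0 then some x else acc)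

def searchLastNegativeBeforeZero (nums : List Int) : Option Int :=
  pvGoA nums none

-- ===== PORT B =====
-- B: stop = index of first 0 (or len), then first negative in the reversed prefix
def searchLastNegativeBeforeZero_alt (nums : List Int) : Option Int :=
  (nums.take ((PySem.List.index? nums (0 : Int)).getD nums.length)).reverse.find?
    (fun x => x < 0)

-- ===== PRECONDITION & SPEC =====
def Spec_searchLastNegativeBeforeZero (nums : List Int) (out : Option Int) : Prop := out = searchLastNegativeBeforeZero_alt nums
instance (nums : List Int) (out : Option Int) : Decidable (Spec_searchLastNegativeBeforeZero nums out) := by unfold Spec_searchLastNegativeBeforeZero; infer_instance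

-- ===== CLAIM (what is proved, stated in full; the proofs are below) =====
def Claim_equal_searchLastNegativeBeforeZero : Prop := ∀ (nums : List Int), Dom_searchLastNegativeBeforeZero nums → Spec_searchLastNegativeBeforeZero nums (searchLastNegativeBeforeZero nums)

-- ===== LEMMAS AND PROOFS =====

-- accumulator invariant for A's loop
theorem pvGoA_acc (xs : List Int) (acc : Option Int) :
    pvGoA xs acc = (pvGoA xs none).or acc := by
  induction xs generalizing acc with
  | nil => simp [pvGoA]
  | cons x xs ih =>
      by_cases hx : x = 0
      · simp [pvGoA, hx]
      · simp only [pvGoA, beq_iff_eq, hx, if_false]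
        rw [ih (if x < 0 then some x else acc), ih (if x < 0 then some x else none)]
        by_cases hneg : x < 0 <;> simp [hneg]

theorem pvAB (nums : List Int) :
    pvGoA nums none = searchLastNegativeBeforeZero_alt nums := by
  induction nums with
  | nil => simp [pvGoA, searchLastNegativeBeforeZero_alt, PySem.List.index?]
  | cons x xs ih =>
      unfold searchLastNegativeBeforeZero_alt
      by_cases hx : x = 0
      · subst hx
        rw [PySem.List.index?_cons_self]
        simp [pvGoA]
      · rw [PySem.List.index?_cons_of_ne _ hx]
        simp only [pvGoA, beq_iff_eq, hx, if_false]
        rw [pvGoA_acc, ih]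
        unfold searchLastNegativeBeforeZero_alt
        cases h : PySem.List.index? xs (0 : Int) with
        | none =>
            simp only [Option.map_none, Option.getD_none]
            simp [List.find?_append]
        | some k =>
            simp only [Option.map_some, Option.getD_some]
            simp [List.take_succ_cons, List.find?_append]

-- ===== VERDICT (by name: the statement is the Claim_ definition above) =====
theorem searchLastNegativeBeforeZero_spec : Claim_equal_searchLastNegativeBeforeZero := by
  intro nums _
  unfold Spec_searchLastNegativeBeforeZero searchLastNegativeBeforeZero
  exact pvAB nums
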